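-- pv_equiv track=rewrite | github.com/gidabrams23/COT_Freight_Optimization_Tool | blueprints/prograde/services/pj_rules.py | _group_columns_by_zone
-- ===== SOURCE A (Python) =====
-- def _row_to_dict(row):
--     if isinstance(row, dict):
--         return row
--     return dict(row or {})
--
-- def _group_columns_by_zone(positions):
--     grouped = {"lower_deck": {}, "upper_deck": {}}
--     for p in positions:
--         pos = _row_to_dict(p)
--         zone = pos.get("deck_zone")
--         if zone not in grouped:
--             continue
--         seq = int(pos.get("sequence") or 0)
--         grouped[zone].setdefault(seq, []).append(pos)
--     for zone in grouped:
--         for seq in list(grouped[zone].keys()):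
--             grouped[zone][seq] = sorted(grouped[zone][seq], key=lambda row: int((row or {}).get("layer") or 0))
--     return grouped
-- ===== SOURCE B (Python) =====
-- def _row_to_dict(row):
--     if isinstance(row, dict):
--         return row
--     return dict(row or {})
--
-- def _seq_key(row):
--     return int(row.get("sequence") or 0)
--
-- def _layer_key(row):
--     return int((row or {}).get("layer") or 0)
--
-- def _zone_block(rows, zone):
--     zrows = [r for r in rows if r.get("deck_zone") == zone]
--     seqs = list(dict.fromkeys(_seq_key(r) for r in zrows))
--     return {s: sorted([r for r in zrows if _seq_key(r) == s], key=_layer_key)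
--             for s in seqs}
--
-- def _group_columns_by_zone(positions):
--     rows = [_row_to_dict(p) for p in positions]
--     return {zone: _zone_block(rows, zone) for zone in ("lower_deck", "upper_deck")}
-- ===== Notes on version B (the rewrite author's own statement) =====
-- stated objective: alternative
-- what changed: A makes one imperative pass that accumulates nested dicts via setdefault/append and then runs a second loop sorting every bucket in place; B is a declarative decomposition that, per deck zone, filters the zone's rows, dedups the sequence keys in first-occurrence order, and builds each bucket directly as a filter-then-sort comprehension, with no mutable dict accumulation.
import Mathlib
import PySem

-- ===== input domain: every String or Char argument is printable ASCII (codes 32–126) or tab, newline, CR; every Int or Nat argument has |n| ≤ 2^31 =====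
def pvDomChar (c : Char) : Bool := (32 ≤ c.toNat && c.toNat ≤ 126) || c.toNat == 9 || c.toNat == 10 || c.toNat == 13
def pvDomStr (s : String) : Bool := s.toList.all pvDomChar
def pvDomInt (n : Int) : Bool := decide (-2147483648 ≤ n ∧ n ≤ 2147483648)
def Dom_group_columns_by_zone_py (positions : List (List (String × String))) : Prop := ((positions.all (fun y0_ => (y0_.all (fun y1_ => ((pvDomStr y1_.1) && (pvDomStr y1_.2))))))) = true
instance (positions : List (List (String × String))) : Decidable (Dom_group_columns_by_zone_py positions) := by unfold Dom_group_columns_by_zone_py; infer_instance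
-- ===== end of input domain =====

-- B replaces A's one-pass nested-dict accumulation (then a per-bucket sort loop) by a declarative
-- per-zone decomposition: filter the rows of the zone, dedup the sequence keys in first-occurrence
-- order, and build each bucket by filtering and sorting; objective: alternative (not faster).

-- shared primitives (both Pythons convert rows with dict(...) and compute int(row.get(k) or 0))
-- int(o or 0): none exactly where Python's int() raises ValueError (excluded by Pre_)
def pyIntOr0? (o : Option String) : Option Int :=
  match o with
  | none => some 0
  | some s => if s = "" then some 0 else PySem.Int.ofStr? s

-- value used by the ports; the `none` (ValueError) case is excluded by Pre_group_columns_by_zone_py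
def pyIntOr0 (o : Option String) : Int := (pyIntOr0? o).getD 0

-- dict .get(k) on a row stored as its items list (unique keys)
def pvRowGet (row : List (String × String)) (k : String) : Option String :=
  (PySem.Dict.mk row).get? k

-- _row_to_dict(p) = dict(p), represented by its items list
def pvRowToItems (p : List (String × String)) : List (String × String) :=
  (PySem.Dict.ofList p).items

-- int(pos.get("sequence") or 0)
def pvSeqKey (row : List (String × String)) : Int := pyIntOr0 (pvRowGet row "sequence")

-- int((row or {}).get("layer") or 0)  ((row or {}) is row itself: an empty dict gets the same answer)
def pvLayerKey (row : List (String × String)) : Int := pyIntOr0 (pvRowGet row "layer")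

-- ===== PORT A =====
-- grouped[zone].setdefault(seq, []).append(pos)
def pvBucketAppend (d : PySem.Dict Int (List (List (String × String))))
    (pos : List (String × String)) : PySem.Dict Int (List (List (String × String))) :=
  d.modify (pvSeqKey pos) [] (fun l => l ++ [pos])

-- one iteration of A's loop ('zone not in grouped: continue' = the two-key membership test)
def pvStepA
    (g : PySem.Dict Int (List (List (String × String))) × PySem.Dict Int (List (List (String × String))))
    (p : List (String × String)) :
    PySem.Dict Int (List (List (String × String))) × PySem.Dict Int (List (List (String × String))) :=
  let pos := pvRowToItems p
  let zone := pvRowGet pos "deck_zone"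
  if zone == some "lower_deck" then (pvBucketAppend g.1 pos, g.2)
  else if zone == some "upper_deck" then (g.1, pvBucketAppend g.2 pos)
  else g

def group_columns_by_zone_py (positions : List (List (String × String))) :
    List (String × List (Int × List (List (String × String)))) :=
  let g := positions.foldl pvStepA (PySem.Dict.empty, PySem.Dict.empty)
  -- final loop: grouped[zone][seq] = sorted(..., key=layer)  (assignment keeps key positions)
  [("lower_deck", g.1.items.map (fun q => (q.1, PySem.List.sorted q.2 pvLayerKey false))),
   ("upper_deck", g.2.items.map (fun q => (q.1, PySem.List.sorted q.2 pvLayerKey false)))]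

-- ===== PORT B =====
-- _zone_block(rows, zone): filter the zone's rows, dedup the sequence keys, filter+sort each bucket
def pvZoneBlock (rows : List (List (String × String))) (zone : String) :
    List (Int × List (List (String × String))) :=
  let zrows := rows.filter (fun r => pvRowGet r "deck_zone" == some zone)
  let seqs := PySem.List.dedup (zrows.map pvSeqKey)
  seqs.map (fun s => (s, PySem.List.sorted (zrows.filter (fun r => pvSeqKey r == s)) pvLayerKey false))

def group_columns_by_zone_py_alt (positions : List (List (String × String))) :
    List (String × List (Int × List (List (String × String)))) :=
  let rows := positions.map pvRowToItems
  [("lower_deck", pvZoneBlock rows "lower_deck"), ("upper_deck", pvZoneBlock rows "upper_deck")]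

-- ===== PRECONDITION & SPEC =====
-- Pre_ excludes exactly the inputs where Python A raises ValueError: a row in one of the two deck
-- zones whose non-empty "sequence" or "layer" string is not int()-parsable.
def Pre_group_columns_by_zone_py (positions : List (List (String × String))) : Prop :=
  ∀ p ∈ positions,
    (pvRowGet (pvRowToItems p) "deck_zone" = some "lower_deck" ∨
     pvRowGet (pvRowToItems p) "deck_zone" = some "upper_deck") →
    (pyIntOr0? (pvRowGet (pvRowToItems p) "sequence")).isSome = true ∧
    (pyIntOr0? (pvRowGet (pvRowToItems p) "layer")).isSome = true

instance (positions : List (List (String × String))) : Decidable (Pre_group_columns_by_zone_py positions) := by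
  unfold Pre_group_columns_by_zone_py; infer_instance

def pvWitness_group_columns_by_zone_py : (List (List (String × String))) :=
  [[("deck_zone", "lower_deck"), ("sequence", "2"), ("layer", "1")],
   [("deck_zone", "upper_deck"), ("sequence", ""), ("layer", "-3")]]

def Spec_group_columns_by_zone_py (positions : List (List (String × String))) (out : List (String × List (Int × List (List (String × String))))) : Prop := out = group_columns_by_zone_py_alt positions
instance (positions : List (List (String × String))) (out : List (String × List (Int × List (List (String × String))))) : Decidable (Spec_group_columns_by_zone_py positions out) := by
  unfold Spec_group_columns_by_zone_py
  exact @List.hasDecEq _ (@instDecidableEqProd _ _ _ (by infer_instance)) _ _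

-- ===== CLAIM (what is proved, stated in full; the proofs are below) =====
def Claim_equal_group_columns_by_zone_py : Prop := ∀ (positions : List (List (String × String))), Dom_group_columns_by_zone_py positions → Pre_group_columns_by_zone_py positions → Spec_group_columns_by_zone_py positions (group_columns_by_zone_py positions)

-- ===== LEMMAS AND PROOFS =====

-- first match by key in a keyed map
theorem find?_fst_map_mk {β : Type} (l : List Int) (g : Int → β) (k0 : Int) :
    List.find? (fun p => p.1 == k0) (l.map (fun s => (s, g s)))
      = if k0 ∈ l then some (k0, g k0) else none := by
  induction l with
  | nil => simp
  | cons a t ih =>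
    by_cases h : a = k0
    · subst h; simp
    · simp [h, ih, Ne.symm h]

-- the grouping fold, characterised: keys in first-occurrence order, each bucket a filter
theorem groupby_items {α : Type} (k : α → Int) (xs : List α) :
    (xs.foldl (fun d r => d.modify (k r) [] (fun l => l ++ [r])) PySem.Dict.empty).items
      = (PySem.List.dedup (xs.map k)).map (fun s => (s, xs.filter (fun r => k r == s))) := by
  induction xs using List.reverseRecOn with
  | nil => rfl
  | append_singleton xs r ih =>
    rw [List.foldl_append, List.foldl_cons, List.foldl_nil]
    rw [List.map_append, List.map_singleton, PySem.List.dedup, PySem.Set.ofList_append_singleton,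
        ← PySem.List.dedup]
    by_cases hmem : k r ∈ xs.map k
    · have hmemL : k r ∈ PySem.List.dedup (xs.map k) := by
        simpa [PySem.List.dedup, PySem.Set.mem_ofList] using hmem
      have hadd : PySem.Set.add (PySem.List.dedup (xs.map k)) (k r) = PySem.List.dedup (xs.map k) :=
        PySem.Set.add_of_mem hmemL
      have hcontains : (xs.foldl (fun d r => d.modify (k r) [] (fun l => l ++ [r]))
          PySem.Dict.empty).contains (k r) = true := by
        simp only [PySem.Dict.contains, ih, List.any_map]
        simp only [List.any_eq_true, Function.comp]
        exact ⟨k r, hmemL, by simp⟩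
      have hget : (xs.foldl (fun d r => d.modify (k r) [] (fun l => l ++ [r]))
          PySem.Dict.empty).getD (k r) [] = xs.filter (fun r' => k r' == k r) := by
        simp only [PySem.Dict.getD, PySem.Dict.get?, ih, find?_fst_map_mk, hmemL, if_true]
        rfl
      rw [PySem.Dict.modify, hget, PySem.Dict.insert, hcontains, if_pos rfl, hadd]
      simp only [ih, List.map_map]
      apply List.map_congr_left
      intro s _
      by_cases hs : s = k r
      · subst hs; simp [List.filter_append]
      · simp [Function.comp, hs, List.filter_append, Ne.symm hs]
    · have hnotL : k r ∉ PySem.List.dedup (xs.map k) := by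
        simpa [PySem.List.dedup, PySem.Set.mem_ofList] using hmem
      have hadd : PySem.Set.add (PySem.List.dedup (xs.map k)) (k r) = PySem.List.dedup (xs.map k) ++ [k r] :=
        PySem.Set.add_of_not_mem hnotL
      have hcontains : (xs.foldl (fun d r => d.modify (k r) [] (fun l => l ++ [r]))
          PySem.Dict.empty).contains (k r) = false := by
        simp only [PySem.Dict.contains, ih, List.any_map]
        simp only [List.any_eq_false, Function.comp]
        intro s hs
        simp only [beq_iff_eq]
        exact fun h => hnotL (h ▸ hs)
      have hget : (xs.foldl (fun d r => d.modify (k r) [] (fun l => l ++ [r]))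
          PySem.Dict.empty).getD (k r) [] = [] := by
        simp only [PySem.Dict.getD, PySem.Dict.get?, ih, find?_fst_map_mk, hnotL, if_false]
        rfl
      have hfilter : xs.filter (fun r' => k r' == k r) = [] := by
        rw [List.filter_eq_nil_iff]
        intro a ha
        simp only [beq_iff_eq]
        exact fun h => hmem (h ▸ List.mem_map_of_mem ha)
      rw [PySem.Dict.modify, hget, PySem.Dict.insert, hcontains]
      simp only [Bool.false_eq_true, if_false, ih]
      rw [hadd, List.map_append, List.map_singleton]
      have h1 : (PySem.List.dedup (xs.map k)).map (fun s => (s, xs.filter (fun r => k r == s)))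
          = (PySem.List.dedup (xs.map k)).map (fun s => (s, (xs ++ [r]).filter (fun r' => k r' == s))) := by
        apply List.map_congr_left
        intro s hsL
        have hs : s ≠ k r := fun h => hnotL (h ▸ hsL)
        simp [List.filter_append, Ne.symm hs]
      rw [h1]
      simp [List.filter_append, hfilter]

-- A's dispatching loop body, written as two independent conditional updates
theorem stepA_split (g : PySem.Dict Int (List (List (String × String))) × PySem.Dict Int (List (List (String × String))))
    (p : List (String × String)) :
    pvStepA g p =
      ((if pvRowGet (pvRowToItems p) "deck_zone" == some "lower_deck"
          then pvBucketAppend g.1 (pvRowToItems p) else g.1),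
       (if pvRowGet (pvRowToItems p) "deck_zone" == some "upper_deck"
          then pvBucketAppend g.2 (pvRowToItems p) else g.2)) := by
  unfold pvStepA
  by_cases h1 : pvRowGet (pvRowToItems p) "deck_zone" == some "lower_deck"
  · have h2 : (pvRowGet (pvRowToItems p) "deck_zone" == some "upper_deck") = false := by
      rw [beq_iff_eq] at h1; simp [h1]
    simp [h1, h2]
  · by_cases h2 : pvRowGet (pvRowToItems p) "deck_zone" == some "upper_deck" <;>
      simp [h1, h2]

-- one zone of A's result equals B's pvZoneBlock
theorem zone_side (positions : List (List (String × String))) (zone : String) :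
    ((positions.foldl (fun d p => if pvRowGet (pvRowToItems p) "deck_zone" == some zone
        then pvBucketAppend d (pvRowToItems p) else d) PySem.Dict.empty).items.map
          (fun q => (q.1, PySem.List.sorted q.2 pvLayerKey false)))
      = pvZoneBlock (positions.map pvRowToItems) zone := by
  rw [PySem.List.foldl_if_eq_foldl_filter
        (fun p => pvRowGet (pvRowToItems p) "deck_zone" == some zone)
        (fun d p => pvBucketAppend d (pvRowToItems p))]
  have hmap : (positions.map pvRowToItems).filter (fun r => pvRowGet r "deck_zone" == some zone)
      = (positions.filter (fun p => pvRowGet (pvRowToItems p) "deck_zone" == some zone)).map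
          pvRowToItems := by
    rw [List.filter_map]; rfl
  unfold pvZoneBlock
  rw [hmap, ← List.foldl_map (f := pvRowToItems)
        (g := fun d r => pvBucketAppend d r)]
  have hb : (fun (d : PySem.Dict Int (List (List (String × String)))) r => pvBucketAppend d r)
      = fun d r => d.modify (pvSeqKey r) [] (fun l => l ++ [r]) := rfl
  rw [hb, groupby_items pvSeqKey, List.map_map]
  rfl

-- ===== VERDICT (by name: the statement is the Claim_ definition above) =====
theorem group_columns_by_zone_py_spec : Claim_equal_group_columns_by_zone_py := by
  intro positions _ _
  unfold Spec_group_columns_by_zone_py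
  have hA : group_columns_by_zone_py positions =
      [("lower_deck", (positions.foldl pvStepA (PySem.Dict.empty, PySem.Dict.empty)).1.items.map
          (fun q => (q.1, PySem.List.sorted q.2 pvLayerKey false))),
       ("upper_deck", (positions.foldl pvStepA (PySem.Dict.empty, PySem.Dict.empty)).2.items.map
          (fun q => (q.1, PySem.List.sorted q.2 pvLayerKey false)))] := rfl
  have hB : group_columns_by_zone_py_alt positions =
      [("lower_deck", pvZoneBlock (positions.map pvRowToItems) "lower_deck"),
       ("upper_deck", pvZoneBlock (positions.map pvRowToItems) "upper_deck")] := rfl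
  rw [hA, hB,
      PySem.List.foldl_congr_mem positions pvStepA _ (PySem.Dict.empty, PySem.Dict.empty)
        (fun acc x _ => stepA_split acc x),
      PySem.List.foldl_prod_mk
        (f := fun d p => if pvRowGet (pvRowToItems p) "deck_zone" == some "lower_deck"
            then pvBucketAppend d (pvRowToItems p) else d)
        (g := fun d p => if pvRowGet (pvRowToItems p) "deck_zone" == some "upper_deck"
            then pvBucketAppend d (pvRowToItems p) else d)]
  simp only [zone_side positions "lower_deck", zone_side positions "upper_deck"]
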